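-- pv_equiv track=rewrite | github.com/threecuptea/leetcode_python | src/leetcode/min_spanning_tree_one_free_edge.py | calculateMinimumSpanningTreeWeightWithFreeEdge
-- ===== SOURCE A (Python) =====
-- import heapq
-- from collections import defaultdict
--
-- def calculateMinimumSpanningTreeWeightWithFreeEdge(n, m, edges):
--     # Write your code here
--     g = defaultdict(list)
--     for u, v, w in edges:
--         g[u].append((v, w))
--         g[v].append((u, w))
--     min_weight = {}
--     min_heap = []
--     heapq.heapify(min_heap)
--     heapq.heappush(min_heap, (0, 0))
--
--     while min_heap:
--         weight_to_i, i = heapq.heappop(min_heap)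
--         # visited before
--         if i in min_weight:
--             continue
--         min_weight[i] = weight_to_i
--         if len(min_weight) == n:
--             break
--         for nei, nei_weight in g[i]:
--             if nei not in min_weight:
--                 heapq.heappush(min_heap, (nei_weight, nei))
--
--     values = min_weight.values()
--     return sum(values) - max(values)
-- ===== SOURCE B (Python) =====
-- def calculateMinimumSpanningTreeWeightWithFreeEdge(n, m, edges):
--     # Selection-based Prim (no heap, no adjacency structure): grow node 0's tree by
--     # repeatedly scanning all edges for the lexicographically smallest crossing edge.
--     visited = {0: 0}
--     while len(visited) != n:
--         cand = [(w, y) for u, v, w in edges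
--                        for x, y in ((u, v), (v, u))
--                        if x in visited and y not in visited]
--         if not cand:
--             break
--         w, b = min(cand)
--         visited[b] = w
--     vals = visited.values()
--     return sum(vals) - max(vals)
-- ===== Notes on version B (the rewrite author's own statement) =====
-- stated objective: alternative
-- what changed: Replaces heap-based Prim (adjacency defaultdict + heapq with stale entries) by selection-based Prim: each round rescans the edge list, takes the lexicographically smallest (weight, node) crossing edge and adds it; no heap and no adjacency structure.
import Mathlib
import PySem

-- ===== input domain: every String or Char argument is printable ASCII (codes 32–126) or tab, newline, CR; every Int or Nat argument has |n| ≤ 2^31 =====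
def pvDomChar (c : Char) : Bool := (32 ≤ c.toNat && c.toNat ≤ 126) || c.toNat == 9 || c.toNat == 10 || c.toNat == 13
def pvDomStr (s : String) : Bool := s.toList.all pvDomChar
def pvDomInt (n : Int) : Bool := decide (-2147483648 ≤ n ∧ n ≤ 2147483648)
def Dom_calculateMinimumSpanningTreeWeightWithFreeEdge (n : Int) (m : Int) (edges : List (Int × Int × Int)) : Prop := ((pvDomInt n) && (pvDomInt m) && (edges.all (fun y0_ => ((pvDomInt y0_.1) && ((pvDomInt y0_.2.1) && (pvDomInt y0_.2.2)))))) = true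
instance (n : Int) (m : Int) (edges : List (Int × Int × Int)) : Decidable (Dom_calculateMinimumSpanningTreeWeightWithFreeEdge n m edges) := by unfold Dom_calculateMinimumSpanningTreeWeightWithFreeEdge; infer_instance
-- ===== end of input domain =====

-- B replaces heap-based Prim by selection-based Prim (per-round scan for the smallest
-- crossing edge, no heap, no adjacency structure): an alternative algorithm, not faster.

set_option maxHeartbeats 1000000


-- ===== PORT A =====
-- Python tuple comparison (w, node) < (w', node'), as heapq orders the heap entries.
def pvLexLt (p q : Int × Int) : Bool := p.1 < q.1 || (p.1 == q.1 && p.2 < q.2)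

-- Observable behaviour of heapq.heappop on the heap's multiset of entries: remove and
-- return the smallest (weight, node) tuple (equal tuples are indistinguishable, so which
-- copy is removed is unobservable); heappush is modelled by consing onto the multiset.
def pvHeapPop (heap : List (Int × Int)) : Option ((Int × Int) × List (Int × Int)) :=
  match heap with
  | [] => none
  | h :: t =>
    let m := t.foldl (fun a b => if pvLexLt b a then b else a) h
    some (m, (h :: t).erase m)

-- g = defaultdict(list); for u, v, w in edges: g[u].append((v, w)); g[v].append((u, w))
def pvBuildG (edges : List (Int × Int × Int)) : PySem.Dict Int (List (Int × Int)) :=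
  edges.foldl
    (fun g e =>
      (g.modify e.1 [] (· ++ [(e.2.1, e.2.2)])).modify e.2.1 [] (· ++ [(e.1, e.2.2)]))
    PySem.Dict.empty

-- the 'while min_heap:' loop (fuel bounds the pops; 2*len(edges)+2 always suffices,
-- since at most 2*len(edges)+1 entries are ever pushed)
def pvALoop (g : PySem.Dict Int (List (Int × Int))) (n : Int) :
    Nat → List (Int × Int) → PySem.Dict Int Int → PySem.Dict Int Int
  | 0, _, mw => mw
  | fuel + 1, heap, mw =>
    match pvHeapPop heap with
    | none => mw
    | some (wi, rest) =>
      if mw.contains wi.2 then pvALoop g n fuel rest mw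
      else
        let mw' := mw.insert wi.2 wi.1
        if (mw'.size : Int) = n then mw'
        else
          let heap' := (g.getD wi.2 []).foldl
            (fun h p => if mw'.contains p.1 then h else (p.2, p.1) :: h) rest
          pvALoop g n fuel heap' mw'

def calculateMinimumSpanningTreeWeightWithFreeEdge (n : Int) (m : Int) (edges : List (Int × Int × Int)) : Int :=
  let g := pvBuildG edges
  let mw := pvALoop g n (2 * edges.length + 2) [(0, 0)] PySem.Dict.empty
  let values := mw.values
  match PySem.List.max? values (fun x => x) with
  | none => 0  -- unreachable: min_weight always contains node 0, so max() never raises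
  | some mx => values.sum - mx

-- ===== PORT B =====
-- cand = [(w, y) for u, v, w in edges for x, y in ((u, v), (v, u)) if x in visited and y not in visited]
def pvCand (edges : List (Int × Int × Int)) (vis : PySem.Dict Int Int) : List (Int × Int) :=
  edges.foldl
    (fun acc e =>
      let acc := if vis.contains e.1 && !vis.contains e.2.1 then acc ++ [(e.2.2, e.2.1)] else acc
      if vis.contains e.2.1 && !vis.contains e.1 then acc ++ [(e.2.2, e.1)] else acc)
    []

-- the 'while len(visited) != n:' loop (fuel bounds the rounds; each round finishes one
-- whole edge, so len(edges)+1 always suffices); min(cand) on int pairs is min2?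
def pvBLoop (edges : List (Int × Int × Int)) (n : Int) :
    Nat → PySem.Dict Int Int → PySem.Dict Int Int
  | 0, vis => vis
  | fuel + 1, vis =>
    if (vis.size : Int) = n then vis
    else
      match PySem.List.min2? (pvCand edges vis) (·.1) (·.2) with
      | none => vis
      | some wb => pvBLoop edges n fuel (vis.insert wb.2 wb.1)

def calculateMinimumSpanningTreeWeightWithFreeEdge_alt (n : Int) (m : Int) (edges : List (Int × Int × Int)) : Int :=
  let vis := pvBLoop edges n (edges.length + 1) (PySem.Dict.empty.insert 0 0)
  let vals := vis.values
  match PySem.List.max? vals (fun x => x) with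
  | none => 0  -- unreachable: visited always contains node 0, so max() never raises
  | some mx => vals.sum - mx

-- ===== PRECONDITION & SPEC =====
def Spec_calculateMinimumSpanningTreeWeightWithFreeEdge (n : Int) (m : Int) (edges : List (Int × Int × Int)) (out : Int) : Prop := out = calculateMinimumSpanningTreeWeightWithFreeEdge_alt n m edges
instance (n : Int) (m : Int) (edges : List (Int × Int × Int)) (out : Int) : Decidable (Spec_calculateMinimumSpanningTreeWeightWithFreeEdge n m edges out) := by unfold Spec_calculateMinimumSpanningTreeWeightWithFreeEdge; infer_instance

-- ===== CLAIM (what is proved, stated in full; the proofs are below) =====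
def Claim_equal_calculateMinimumSpanningTreeWeightWithFreeEdge : Prop := ∀ (n : Int) (m : Int) (edges : List (Int × Int × Int)), Dom_calculateMinimumSpanningTreeWeightWithFreeEdge n m edges → Spec_calculateMinimumSpanningTreeWeightWithFreeEdge n m edges (calculateMinimumSpanningTreeWeightWithFreeEdge n m edges)

-- ===== LEMMAS AND PROOFS =====

-- lexicographic ≤ on (weight, node) pairs (Prop form used by the proofs)
def pvLexLe (p q : Int × Int) : Prop := p.1 < q.1 ∨ (p.1 = q.1 ∧ p.2 ≤ q.2)

-- both directed arcs of every edge, in source-first form (src, dst, w)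
def pvArcs (edges : List (Int × Int × Int)) : List (Int × Int × Int) :=
  edges.flatMap (fun e => [(e.1, e.2.1, e.2.2), (e.2.1, e.1, e.2.2)])

-- the crossing entries (w, dst): arcs from a visited source to an unvisited target
def pvCross (edges : List (Int × Int × Int)) (vis : PySem.Dict Int Int) : List (Int × Int) :=
  ((pvArcs edges).filter (fun a => vis.contains a.1 && !vis.contains a.2.1)).map
    (fun a => (a.2.2, a.2.1))

lemma pvLexLe_refl (p : Int × Int) : pvLexLe p p := Or.inr ⟨rfl, le_rfl⟩

lemma pvLexLe_trans {p q r : Int × Int} (h1 : pvLexLe p q) (h2 : pvLexLe q r) : pvLexLe p r := by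
  unfold pvLexLe at *; omega

lemma pvLexLe_antisymm {p q : Int × Int} (h1 : pvLexLe p q) (h2 : pvLexLe q p) : p = q := by
  obtain ⟨a, b⟩ := p; obtain ⟨c, d⟩ := q
  unfold pvLexLe at *; simp at *; omega

lemma pvLexLt_le {p q : Int × Int} (h : pvLexLt p q = true) : pvLexLe p q := by
  simp [pvLexLt] at h; unfold pvLexLe; omega

lemma pvLexLt_false_le {p q : Int × Int} (h : pvLexLt p q = false) : pvLexLe q p := by
  simp [pvLexLt] at h; unfold pvLexLe; omega

lemma pvFoldlMinSpec : ∀ (t : List (Int × Int)) (x : Int × Int),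
    (t.foldl (fun a b => if pvLexLt b a then b else a) x) ∈ x :: t ∧
    ∀ y ∈ x :: t, pvLexLe (t.foldl (fun a b => if pvLexLt b a then b else a) x) y := by
  intro t
  induction t with
  | nil =>
    intro x
    refine ⟨by simp, ?_⟩
    intro y hy; simp at hy; subst hy; exact pvLexLe_refl y
  | cons b t ih =>
    intro x
    simp only [List.foldl_cons]
    obtain ⟨hmem, hmin⟩ := ih (if pvLexLt b x then b else x)
    have hsub : (if pvLexLt b x then b else x) ∈ x :: b :: t := by
      by_cases hbx : pvLexLt b x = true <;> simp [hbx]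
    have hle1 : pvLexLe (if pvLexLt b x then b else x) x := by
      by_cases hbx : pvLexLt b x = true
      · rw [if_pos hbx]; exact pvLexLt_le hbx
      · rw [if_neg hbx]; exact pvLexLe_refl x
    have hle2 : pvLexLe (if pvLexLt b x then b else x) b := by
      by_cases hbx : pvLexLt b x = true
      · rw [if_pos hbx]; exact pvLexLe_refl b
      · rw [if_neg hbx]; exact pvLexLt_false_le (by simpa using hbx)
    constructor
    · rcases List.mem_cons.mp hmem with h | h
      · rw [h]; exact hsub
      · exact List.mem_cons_of_mem _ (List.mem_cons_of_mem _ h)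
    · intro y hy
      rcases List.mem_cons.mp hy with h | h
      · subst h; exact pvLexLe_trans (hmin _ (by simp)) hle1
      · rcases List.mem_cons.mp h with h2 | h2
        · subst h2; exact pvLexLe_trans (hmin _ (by simp)) hle2
        · exact hmin y (List.mem_cons_of_mem _ h2)

lemma pvHeapPop_spec (heap : List (Int × Int)) (hne : heap ≠ []) :
    ∃ mv, pvHeapPop heap = some (mv, heap.erase mv) ∧ mv ∈ heap ∧ ∀ y ∈ heap, pvLexLe mv y := by
  match heap with
  | [] => exact absurd rfl hne
  | x :: t =>
    obtain ⟨hmem, hmin⟩ := pvFoldlMinSpec t x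
    exact ⟨_, rfl, hmem, hmin⟩

-- the accumulator step of min2? (matches its definition on Int pairs)
def pvStep (acc : Option (Int × Int)) (x : Int × Int) : Option (Int × Int) :=
  match acc with
  | none => some x
  | some mv =>
    if (decide (x.1 < mv.1) || (!decide (mv.1 < x.1) && decide (x.2 < mv.2))) = true then some x
    else some mv

lemma pvMin2_eq_foldl (l : List (Int × Int)) :
    PySem.List.min2? l (·.1) (·.2) = l.foldl pvStep none := by
  unfold PySem.List.min2?
  apply PySem.List.foldl_congr_mem
  intro acc x _
  cases acc <;> rfl

lemma pvMin2Aux : ∀ (l : List (Int × Int)) (q : Int × Int),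
    ∃ r, l.foldl pvStep (some q) = some r ∧ r ∈ q :: l ∧ ∀ y ∈ q :: l, pvLexLe r y := by
  intro l
  induction l with
  | nil =>
    intro q
    refine ⟨q, rfl, by simp, ?_⟩
    intro y hy; simp at hy; subst hy; exact pvLexLe_refl y
  | cons x t ih =>
    intro q
    simp only [List.foldl_cons]
    by_cases hc : (x.1 < q.1 ∨ (¬ q.1 < x.1 ∧ x.2 < q.2))
    · have hs : pvStep (some q) x = some x := by simp [pvStep]; omega
      rw [hs]
      obtain ⟨r, h1, h2, h3⟩ := ih x
      have hxq : pvLexLe x q := by unfold pvLexLe; omega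
      refine ⟨r, h1, ?_, ?_⟩
      · rcases List.mem_cons.mp h2 with h | h
        · simp [h]
        · simp [h]
      · intro y hy
        rcases List.mem_cons.mp hy with h | h
        · subst h; exact pvLexLe_trans (h3 x (by simp)) hxq
        · exact h3 y h
    · have hs : pvStep (some q) x = some q := by simp [pvStep]; omega
      rw [hs]
      obtain ⟨r, h1, h2, h3⟩ := ih q
      have hqx : pvLexLe q x := by unfold pvLexLe; omega
      refine ⟨r, h1, ?_, ?_⟩
      · rcases List.mem_cons.mp h2 with h | h
        · simp [h]
        · simp [h]
      · intro y hy
        rcases List.mem_cons.mp hy with h | h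
        · subst h; exact h3 _ (by simp)
        · rcases List.mem_cons.mp h with h2' | h2'
          · subst h2'; exact pvLexLe_trans (h3 q (by simp)) hqx
          · exact h3 y (by simp [h2'])

lemma pvMin2_nil : PySem.List.min2? ([] : List (Int × Int)) (·.1) (·.2) = none := rfl

lemma pvMin2_cons_spec (x : Int × Int) (t : List (Int × Int)) :
    ∃ r, PySem.List.min2? (x :: t) (·.1) (·.2) = some r ∧ r ∈ x :: t ∧
      ∀ y ∈ x :: t, pvLexLe r y := by
  rw [pvMin2_eq_foldl]
  simpa using pvMin2Aux t x

lemma pvPushPerm (c : Int × Int → Bool) : ∀ (l rest : List (Int × Int)),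
    (l.foldl (fun h p => if c p then h else (p.2, p.1) :: h) rest).Perm
      (rest ++ (l.filter (fun p => !c p)).map (fun p => (p.2, p.1))) := by
  intro l
  induction l with
  | nil => intro rest; simp
  | cons a t ih =>
    intro rest
    by_cases hc : c a
    · simpa [List.foldl_cons, hc] using ih rest
    · simp only [List.foldl_cons, List.filter_cons]
      simp only [Bool.not_eq_true] at hc
      rw [if_neg (by simp [hc]), hc]
      simp only [Bool.not_false, if_pos, List.map_cons]
      exact (ih _).trans List.perm_middle.symm

lemma pvFilterSplitPerm {α : Type} (p q : α → Bool) : ∀ (l : List α),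
    (l.filter p).Perm
      (l.filter (fun x => p x && q x) ++ l.filter (fun x => p x && !q x)) := by
  intro l
  induction l with
  | nil => simp
  | cons a t ih =>
    by_cases hp : p a
    · by_cases hq : q a
      · simpa [List.filter_cons, hp, hq] using ih.cons a
      · simp only [List.filter_cons, hp, hq]
        simp
        exact (ih.cons a).trans List.perm_middle.symm
    · simpa [List.filter_cons, hp] using ih

lemma pvCountPSplit {α : Type} (p q : α → Bool) (l : List α) :
    l.countP p = l.countP (fun x => p x && q x) + l.countP (fun x => p x && !q x) := by
  induction l with
  | nil => simp
  | cons a t ih =>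
    by_cases hp : p a
    · by_cases hq : q a <;> simp [List.countP_cons, hp, hq, ih] <;> omega
    · simp [List.countP_cons, hp, ih]

lemma pvCountPCongr {α : Type} (p q : α → Bool) : ∀ (l : List α),
    (∀ x ∈ l, p x = q x) → l.countP p = l.countP q := by
  intro l
  induction l with
  | nil => intro _; rfl
  | cons a t ih =>
    intro h
    rw [List.countP_cons, List.countP_cons, h a (by simp),
      ih (fun x hx => h x (by simp [hx]))]

lemma pvCountPLt {α : Type} (p q : α → Bool) (x : α) :
    ∀ (l : List α), x ∈ l → p x = true → q x = false → (∀ y, q y = true → p y = true) →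
    l.countP q < l.countP p := by
  intro l
  induction l with
  | nil => intro h; simp at h
  | cons a t ih =>
    intro hmem hp hq him
    rcases List.mem_cons.mp hmem with h | h
    · subst h
      have ht : t.countP q ≤ t.countP p := List.countP_mono_left (fun y _ hy => him y hy)
      simp [List.countP_cons, hp, hq]; omega
    · have := ih h hp hq him
      by_cases hqa : q a
      · simp [List.countP_cons, hqa, him a hqa]; omega
      · simp [List.countP_cons, hqa]
        by_cases hpa : p a <;> simp [hpa] <;> omega

lemma pvArcsLen (edges : List (Int × Int × Int)) : (pvArcs edges).length = 2 * edges.length := by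
  induction edges with
  | nil => rfl
  | cons e t ih => simp [pvArcs] at ih ⊢; omega

lemma pvCand_eq (edges : List (Int × Int × Int)) (vis : PySem.Dict Int Int) :
    pvCand edges vis = pvCross edges vis := by
  have h1 : pvCand edges vis =
      (pvArcs edges).foldl
        (fun acc a => if vis.contains a.1 && !vis.contains a.2.1 then acc ++ [(a.2.2, a.2.1)] else acc)
        [] := by
    unfold pvArcs
    rw [List.foldl_flatMap]
    rfl
  rw [h1, PySem.List.foldl_append_if]
  simp [pvCross]

lemma pvBuildG_eq (edges : List (Int × Int × Int)) :
    pvBuildG edges =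
      (pvArcs edges).foldl (fun d a => d.modify a.1 [] (· ++ [(a.2.1, a.2.2)])) PySem.Dict.empty := by
  unfold pvArcs
  rw [List.foldl_flatMap]
  rfl

lemma pvAdj_eq (edges : List (Int × Int × Int)) (i : Int) :
    (pvBuildG edges).getD i [] =
      ((pvArcs edges).filter (fun a => a.1 == i)).map (fun a => (a.2.1, a.2.2)) := by
  rw [pvBuildG_eq]
  have h2 : (pvArcs edges).foldl (fun d a => d.modify a.1 [] (· ++ [(a.2.1, a.2.2)])) PySem.Dict.empty
      = ((pvArcs edges).map (fun a => (a.1, (a.2.1, a.2.2)))).foldl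
          (fun d p => d.modify p.1 [] (· ++ [p.2])) PySem.Dict.empty := by
    rw [List.foldl_map]
  rw [h2, PySem.Dict.getD_foldl_modify_append]
  simp [List.filter_map, List.map_map, Function.comp_def]

lemma pvPushList_eq (edges : List (Int × Int × Int)) (vis' : PySem.Dict Int Int) (i : Int) :
    (((pvBuildG edges).getD i []).filter (fun p => !vis'.contains p.1)).map (fun p => (p.2, p.1))
      = ((pvArcs edges).filter (fun a => a.1 == i && !vis'.contains a.2.1)).map
          (fun a => (a.2.2, a.2.1)) := by
  rw [pvAdj_eq, List.filter_map, List.map_map, List.filter_filter]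
  simp only [Function.comp_def]
  rw [List.filter_congr (fun a _ => Bool.and_comm (!vis'.contains a.2.1) (a.1 == i))]

-- the invariant: heap entries with an unvisited target are exactly the crossing entries
def pvInv (edges : List (Int × Int × Int)) (heap : List (Int × Int)) (vis : PySem.Dict Int Int) : Prop :=
  (heap.filter (fun p => !vis.contains p.2)).Perm (pvCross edges vis)

-- single-step unfolding lemmas for the two loops
lemma pvALoop_step (g : PySem.Dict Int (List (Int × Int))) (n : Int) (k : Nat)
    (heap : List (Int × Int)) (mw : PySem.Dict Int Int) :
    pvALoop g n (k + 1) heap mw =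
      match pvHeapPop heap with
      | none => mw
      | some (wi, rest) =>
        if mw.contains wi.2 then pvALoop g n k rest mw
        else
          let mw' := mw.insert wi.2 wi.1
          if (mw'.size : Int) = n then mw'
          else
            pvALoop g n k ((g.getD wi.2 []).foldl
              (fun h p => if mw'.contains p.1 then h else (p.2, p.1) :: h) rest) mw' := rfl

lemma pvALoop_skip (g : PySem.Dict Int (List (Int × Int))) (n : Int) (k : Nat)
    (heap : List (Int × Int)) (mw : PySem.Dict Int Int) (mv : Int × Int)
    (hpop : pvHeapPop heap = some (mv, heap.erase mv)) (hc : mw.contains mv.2 = true) :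
    pvALoop g n (k + 1) heap mw = pvALoop g n k (heap.erase mv) mw := by
  rw [pvALoop_step, hpop]; simp [hc]

lemma pvALoop_fresh (g : PySem.Dict Int (List (Int × Int))) (n : Int) (k : Nat)
    (heap : List (Int × Int)) (mw : PySem.Dict Int Int) (mv : Int × Int)
    (hpop : pvHeapPop heap = some (mv, heap.erase mv)) (hc : mw.contains mv.2 = false) :
    pvALoop g n (k + 1) heap mw =
      (if ((mw.insert mv.2 mv.1).size : Int) = n then mw.insert mv.2 mv.1
       else
         pvALoop g n k ((g.getD mv.2 []).foldl
           (fun h p => if (mw.insert mv.2 mv.1).contains p.1 then h else (p.2, p.1) :: h)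
           (heap.erase mv)) (mw.insert mv.2 mv.1)) := by
  rw [pvALoop_step, hpop]; simp [hc]

lemma pvBLoop_step (edges : List (Int × Int × Int)) (n : Int) (k : Nat) (vis : PySem.Dict Int Int) :
    pvBLoop edges n (k + 1) vis =
      (if (vis.size : Int) = n then vis
       else
         match PySem.List.min2? (pvCand edges vis) (·.1) (·.2) with
         | none => vis
         | some wb => pvBLoop edges n k (vis.insert wb.2 wb.1)) := rfl

lemma pvBLoop_sel (edges : List (Int × Int × Int)) (n : Int) (k : Nat) (vis : PySem.Dict Int Int)
    (wb : Int × Int) (hn : ¬ ((vis.size : Int) = n))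
    (hsome : PySem.List.min2? (pvCand edges vis) (·.1) (·.2) = some wb) :
    pvBLoop edges n (k + 1) vis = pvBLoop edges n k (vis.insert wb.2 wb.1) := by
  rw [pvBLoop_step, if_neg hn, hsome]

lemma pvBLoop_ret (edges : List (Int × Int × Int)) (n : Int) (fb : Nat) (vis : PySem.Dict Int Int)
    (hn : ¬ ((vis.size : Int) = n)) (hfb : 1 ≤ fb) (hc : pvCross edges vis = []) :
    pvBLoop edges n fb vis = vis := by
  obtain ⟨j, rfl⟩ : ∃ j, fb = j + 1 := ⟨fb - 1, by omega⟩
  rw [pvBLoop_step, if_neg hn, pvCand_eq, hc, pvMin2_nil]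

-- crossing entries of the grown visited set: old crossing entries whose target is still
-- unvisited, together with the fresh arcs out of the new node
lemma pvCross_insert (edges : List (Int × Int × Int)) (vis : PySem.Dict Int Int) (i w : Int)
    (hi : vis.contains i = false) :
    (pvCross edges (vis.insert i w)).Perm
      (((pvCross edges vis).filter (fun p => !(vis.insert i w).contains p.2)) ++
        ((pvArcs edges).filter (fun a => a.1 == i && !(vis.insert i w).contains a.2.1)).map
          (fun a => (a.2.2, a.2.1))) := by
  have hsplit := pvFilterSplitPerm
    (fun a : Int × Int × Int => (vis.insert i w).contains a.1 && !(vis.insert i w).contains a.2.1)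
    (fun a : Int × Int × Int => vis.contains a.1) (pvArcs edges)
  unfold pvCross
  refine (List.Perm.map _ hsplit).trans ?_
  rw [List.map_append]
  apply List.Perm.append
  · apply List.Perm.of_eq
    rw [List.filter_map, List.filter_filter]
    congr 1
    apply List.filter_congr
    intro a _
    cases hb1 : vis.contains a.1 <;> cases hb2 : vis.contains a.2.1 <;>
      cases h3 : (a.2.1 == i) <;> cases h4 : (a.1 == i) <;>
      simp [PySem.Dict.contains_insert, Function.comp, hb1, hb2, h3, h4]
  · apply List.Perm.of_eq
    congr 1
    apply List.filter_congr
    intro a _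
    by_cases h4 : (a.1 == i) = true
    · have hb1 : vis.contains a.1 = false := by rw [eq_of_beq h4]; exact hi
      simp [PySem.Dict.contains_insert, h4, hb1]
    · have h4' : (a.1 == i) = false := by simpa using h4
      cases hb1 : vis.contains a.1 <;> cases hb2 : vis.contains a.2.1 <;>
        cases h3 : (a.2.1 == i) <;> simp [PySem.Dict.contains_insert, h4', hb1, hb2, h3]

-- the simulation: from any aligned state, A's heap loop and B's selection loop build
-- the same visited dictionary
lemma pvSim (edges : List (Int × Int × Int)) (n : Int) :
    ∀ (fa : Nat) (fb : Nat) (heap : List (Int × Int)) (vis : PySem.Dict Int Int),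
      pvInv edges heap vis →
      heap.length + (pvArcs edges).countP (fun a => !vis.contains a.1) ≤ fa →
      edges.countP (fun e => !vis.contains e.1 || !vis.contains e.2.1) + 1 ≤ fb →
      ¬ ((vis.size : Int) = n) →
      pvALoop (pvBuildG edges) n fa heap vis = pvBLoop edges n fb vis := by
  intro fa
  induction fa with
  | zero =>
    intro fb heap vis hInv hfa hfb hn
    cases heap with
    | cons hd tl => simp at hfa
    | nil =>
      have h := hInv
      unfold pvInv at h
      simp only [List.filter_nil] at h
      rw [pvBLoop_ret edges n fb vis hn (by omega) (List.perm_nil.mp h.symm)]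
      rfl
  | succ k ih =>
    intro fb heap vis hInv hfa hfb hn
    by_cases hne : heap = []
    · subst hne
      have h := hInv
      unfold pvInv at h
      simp only [List.filter_nil] at h
      rw [pvBLoop_ret edges n fb vis hn (by omega) (List.perm_nil.mp h.symm)]
      rw [pvALoop_step]
      rfl
    · obtain ⟨mv, hpop, hmem, hmin⟩ := pvHeapPop_spec heap hne
      have hlen1 : 1 ≤ heap.length := List.length_pos_of_ne_nil hne
      have hlenrest : (heap.erase mv).length = heap.length - 1 := by
        rw [List.length_erase_of_mem hmem]
      have hperm : heap.Perm (mv :: heap.erase mv) := List.perm_cons_erase hmem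
      by_cases hc : vis.contains mv.2
      · -- stale entry: skip it, state unchanged
        have hInv' : pvInv edges (heap.erase mv) vis := by
          unfold pvInv at hInv ⊢
          refine List.Perm.trans ?_ hInv
          have h := (hperm.filter (fun p => !vis.contains p.2)).symm
          simpa [List.filter_cons, hc] using h
        rw [pvALoop_skip _ _ _ _ _ _ hpop hc]
        exact ih fb (heap.erase mv) vis hInv' (by omega) hfb hn
      · -- fresh entry: both loops add the same node with the same weight
        have hcF : vis.contains mv.2 = false := by simpa using hc
        have hmemc : mv ∈ pvCross edges vis := by
          have h1 : mv ∈ heap.filter (fun p => !vis.contains p.2) :=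
            List.mem_filter.mpr ⟨hmem, by simp [hcF]⟩
          exact hInv.mem_iff.mp h1
        -- B's selection is defined and equals mv
        obtain ⟨cx, ct, hcons⟩ : ∃ cx ct, pvCross edges vis = cx :: ct := by
          cases hcx : pvCross edges vis with
          | nil => rw [hcx] at hmemc; simp at hmemc
          | cons a b => exact ⟨a, b, rfl⟩
        obtain ⟨r, hr, hrmem, hrmin⟩ := pvMin2_cons_spec cx ct
        have hrmem' : r ∈ pvCross edges vis := by rw [hcons]; exact hrmem
        have hrmin' : ∀ y ∈ pvCross edges vis, pvLexLe r y := by rw [hcons]; exact hrmin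
        have hmv_min : ∀ y ∈ pvCross edges vis, pvLexLe mv y := by
          intro y hy
          have hyh : y ∈ heap.filter (fun p => !vis.contains p.2) := hInv.mem_iff.mpr hy
          exact hmin y (List.mem_filter.mp hyh).1
        have hreq : r = mv := pvLexLe_antisymm (hrmin' mv hmemc) (hmv_min r hrmem')
        have hsome : PySem.List.min2? (pvCand edges vis) (·.1) (·.2) = some mv := by
          rw [pvCand_eq, hcons, hr, hreq]
        -- the selected entry comes from some arc, hence from some edge
        have hx := hmemc
        unfold pvCross at hx
        rw [List.mem_map] at hx
        obtain ⟨a, hafil, haeq⟩ := hx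
        rw [List.mem_filter] at hafil
        obtain ⟨haarc, hacond⟩ := hafil
        simp only [Bool.and_eq_true, Bool.not_eq_true'] at hacond
        obtain ⟨hsrc, htgt⟩ := hacond
        obtain ⟨e, hemem, heor⟩ : ∃ e ∈ edges, a = (e.1, e.2.1, e.2.2) ∨ a = (e.2.1, e.1, e.2.2) := by
          have h := haarc
          unfold pvArcs at h
          rw [List.mem_flatMap] at h
          obtain ⟨e, he1, he2⟩ := h
          simp only [List.mem_cons, List.not_mem_nil, or_false] at he2
          exact ⟨e, he1, he2⟩
        subst haeq
        -- the underlying edge loses its last unvisited endpoint: B's round measure drops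
        have hq1e : (!vis.contains e.1 || !vis.contains e.2.1) = true := by
          rcases heor with h | h <;> (rw [h] at hsrc htgt; dsimp only at hsrc htgt) <;>
            simp [hsrc, htgt]
        have hq2e : (!(vis.insert a.2.1 a.2.2).contains e.1 ||
            !(vis.insert a.2.1 a.2.2).contains e.2.1) = false := by
          rcases heor with h | h <;>
            (rw [h] at hsrc htgt ⊢; dsimp only at hsrc htgt ⊢) <;>
            simp [PySem.Dict.contains_insert, hsrc, htgt]
        have hcnt : edges.countP
              (fun e' => !(vis.insert a.2.1 a.2.2).contains e'.1 ||
                !(vis.insert a.2.1 a.2.2).contains e'.2.1) <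
            edges.countP (fun e' => !vis.contains e'.1 || !vis.contains e'.2.1) := by
          apply pvCountPLt _ _ e edges hemem hq1e hq2e
          intro y hy
          cases h1 : vis.contains y.1 <;> cases h2 : vis.contains y.2.1 <;>
            simp_all [PySem.Dict.contains_insert]
        -- fuel bookkeeping for A: the new heap length plus unexplored arcs drops
        have hpushlen : (((pvBuildG edges).getD a.2.1 []).foldl
              (fun h p => if (vis.insert a.2.1 a.2.2).contains p.1 then h else (p.2, p.1) :: h)
              (heap.erase (a.2.2, a.2.1))).length =
            (heap.erase (a.2.2, a.2.1)).length +
              ((pvArcs edges).filter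
                (fun a' => a'.1 == a.2.1 && !(vis.insert a.2.1 a.2.2).contains a'.2.1)).length := by
          have hl := (pvPushPerm (fun p => (vis.insert a.2.1 a.2.2).contains p.1)
            ((pvBuildG edges).getD a.2.1 []) (heap.erase (a.2.2, a.2.1))).length_eq
          rw [List.length_append] at hl
          rw [hl]
          congr 1
          rw [pvPushList_eq edges (vis.insert a.2.1 a.2.2) a.2.1, List.length_map]
        have hfil : ((pvArcs edges).filter
              (fun a' => a'.1 == a.2.1 && !(vis.insert a.2.1 a.2.2).contains a'.2.1)).length ≤
            (pvArcs edges).countP (fun a' => a'.1 == a.2.1) := by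
          rw [← List.countP_eq_length_filter]
          exact List.countP_mono_left (fun x _ hx => ((Bool.and_eq_true _ _).mp hx).1)
        have hsplitA := pvCountPSplit (fun a' : Int × Int × Int => !vis.contains a'.1)
          (fun a' => a'.1 == a.2.1) (pvArcs edges)
        have he1 : (pvArcs edges).countP (fun a' => !vis.contains a'.1 && (a'.1 == a.2.1)) =
            (pvArcs edges).countP (fun a' => a'.1 == a.2.1) := by
          apply pvCountPCongr
          intro x _
          by_cases h4 : (x.1 == a.2.1) = true
          · have : vis.contains x.1 = false := by rw [eq_of_beq h4]; exact htgt
            simp [h4, this]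
          · have h4' : (x.1 == a.2.1) = false := by simpa using h4
            simp [h4']
        have he2 : (pvArcs edges).countP (fun a' => !vis.contains a'.1 && !(a'.1 == a.2.1)) =
            (pvArcs edges).countP (fun a' => !(vis.insert a.2.1 a.2.2).contains a'.1) := by
          apply pvCountPCongr
          intro x _
          cases h1 : vis.contains x.1 <;> cases h4 : (x.1 == a.2.1) <;>
            simp [PySem.Dict.contains_insert, h1, h4]
        -- the invariant survives the step
        have hfc : ((a.2.2, a.2.1) :: heap.erase (a.2.2, a.2.1)).filter
              (fun p => !(vis.insert a.2.1 a.2.2).contains p.2) =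
            (heap.erase (a.2.2, a.2.1)).filter
              (fun p => !(vis.insert a.2.1 a.2.2).contains p.2) := by
          simp [List.filter_cons, PySem.Dict.contains_insert]
        have h2f : (heap.filter (fun p => !vis.contains p.2)).filter
              (fun p => !(vis.insert a.2.1 a.2.2).contains p.2) =
            heap.filter (fun p => !(vis.insert a.2.1 a.2.2).contains p.2) := by
          rw [List.filter_filter]
          apply List.filter_congr
          intro x _
          cases hb : vis.contains x.2 <;> cases h4 : (x.2 == a.2.1) <;>
            simp [PySem.Dict.contains_insert, hb, h4]
        have hstep2 : ((((pvBuildG edges).getD a.2.1 []).filter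
                (fun p => !(vis.insert a.2.1 a.2.2).contains p.1)).map
                (fun p => (p.2, p.1))).filter
              (fun p => !(vis.insert a.2.1 a.2.2).contains p.2) =
            (((pvBuildG edges).getD a.2.1 []).filter
              (fun p => !(vis.insert a.2.1 a.2.2).contains p.1)).map (fun p => (p.2, p.1)) := by
          apply List.filter_eq_self.mpr
          intro x hx
          rw [List.mem_map] at hx
          obtain ⟨p, hp, rfl⟩ := hx
          rw [List.mem_filter] at hp
          simpa using hp.2
        have hInv' : pvInv edges
            (((pvBuildG edges).getD a.2.1 []).foldl
              (fun h p => if (vis.insert a.2.1 a.2.2).contains p.1 then h else (p.2, p.1) :: h)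
              (heap.erase (a.2.2, a.2.1)))
            (vis.insert a.2.1 a.2.2) := by
          unfold pvInv
          refine ((pvPushPerm (fun p => (vis.insert a.2.1 a.2.2).contains p.1)
            ((pvBuildG edges).getD a.2.1 []) (heap.erase (a.2.2, a.2.1))).filter _).trans ?_
          refine List.Perm.trans ?_ (pvCross_insert edges vis a.2.1 a.2.2 htgt).symm
          rw [List.filter_append]
          refine List.Perm.append ?_ ?_
          · have h3 := hperm.filter (fun p => !(vis.insert a.2.1 a.2.2).contains p.2)
            rw [hfc] at h3
            refine h3.symm.trans ?_
            refine (List.Perm.of_eq h2f.symm).trans ?_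
            exact hInv.filter (fun p => !(vis.insert a.2.1 a.2.2).contains p.2)
          · exact List.Perm.of_eq (by rw [hstep2, pvPushList_eq])
        -- run the two loops one step and recurse
        rw [pvALoop_fresh _ _ _ _ _ _ hpop hcF]
        obtain ⟨fb', rfl⟩ : ∃ j, fb = j + 1 := ⟨fb - 1, by omega⟩
        rw [pvBLoop_sel edges n fb' vis _ hn hsome]
        dsimp only
        have hfb' : edges.countP
            (fun e' => !(vis.insert a.2.1 a.2.2).contains e'.1 ||
              !(vis.insert a.2.1 a.2.2).contains e'.2.1) + 1 ≤ fb' := by omega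
        by_cases hsz : (((vis.insert a.2.1 a.2.2).size : Int) = n)
        · rw [if_pos hsz]
          obtain ⟨j, rfl⟩ : ∃ j, fb' = j + 1 := ⟨fb' - 1, by omega⟩
          rw [pvBLoop_step, if_pos hsz]
        · rw [if_neg hsz]
          exact ih fb' _ _ hInv' (by omega) hfb' hsz

-- aligning the initial states: A's first iteration visits node 0 and seeds its heap;
-- B starts from visited = {0: 0}
lemma pvMain (n : Int) (edges : List (Int × Int × Int)) :
    pvALoop (pvBuildG edges) n (2 * edges.length + 2) [(0, 0)] PySem.Dict.empty
      = pvBLoop edges n (edges.length + 1) (PySem.Dict.empty.insert 0 0) := by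
  have hpop0 : pvHeapPop [((0 : Int), (0 : Int))] =
      some (((0 : Int), (0 : Int)), List.erase [((0 : Int), (0 : Int))] ((0 : Int), (0 : Int))) := by
    decide
  have h0 : (PySem.Dict.empty : PySem.Dict Int Int).contains (((0 : Int), (0 : Int)).2) = false := rfl
  rw [show 2 * edges.length + 2 = (2 * edges.length + 1) + 1 from rfl]
  rw [pvALoop_fresh _ _ _ _ _ _ hpop0 h0]
  have herase : List.erase [((0 : Int), (0 : Int))] ((0 : Int), (0 : Int)) = [] := by decide
  rw [herase]
  dsimp only
  by_cases hsz : (((PySem.Dict.empty.insert (0 : Int) (0 : Int)).size : Int) = n)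
  · rw [if_pos hsz, pvBLoop_step, if_pos hsz]
  · rw [if_neg hsz]
    have hInv0 : pvInv edges
        (((pvBuildG edges).getD 0 []).foldl
          (fun h p => if (PySem.Dict.empty.insert (0 : Int) (0 : Int)).contains p.1 then h
            else (p.2, p.1) :: h) [])
        (PySem.Dict.empty.insert 0 0) := by
      unfold pvInv
      refine ((pvPushPerm (fun p => (PySem.Dict.empty.insert (0 : Int) (0 : Int)).contains p.1)
        ((pvBuildG edges).getD 0 []) []).filter _).trans ?_
      have hstep2 : ((((pvBuildG edges).getD (0 : Int) []).filter
              (fun p => !(PySem.Dict.empty.insert (0 : Int) (0 : Int)).contains p.1)).map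
              (fun p => (p.2, p.1))).filter
            (fun p => !(PySem.Dict.empty.insert (0 : Int) (0 : Int)).contains p.2) =
          (((pvBuildG edges).getD (0 : Int) []).filter
            (fun p => !(PySem.Dict.empty.insert (0 : Int) (0 : Int)).contains p.1)).map
            (fun p => (p.2, p.1)) := by
        apply List.filter_eq_self.mpr
        intro x hx
        rw [List.mem_map] at hx
        obtain ⟨p, hp, rfl⟩ := hx
        rw [List.mem_filter] at hp
        simpa using hp.2
      refine List.Perm.of_eq ?_
      rw [List.nil_append, hstep2, pvPushList_eq]
      unfold pvCross
      congr 1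
      apply List.filter_congr
      intro x _
      cases h4 : (x.1 == (0 : Int)) <;>
        simp [PySem.Dict.contains_insert, PySem.Dict.contains_empty, h4]
    refine pvSim edges n _ _ _ _ hInv0 ?_ ?_ hsz
    · -- initial fuel bound for A
      have hl := (pvPushPerm (fun p => (PySem.Dict.empty.insert (0 : Int) (0 : Int)).contains p.1)
        ((pvBuildG edges).getD 0 []) []).length_eq
      rw [List.length_append, List.length_nil, pvPushList_eq, List.length_map] at hl
      have hfil : ((pvArcs edges).filter
            (fun a => a.1 == (0 : Int) &&
              !(PySem.Dict.empty.insert (0 : Int) (0 : Int)).contains a.2.1)).length ≤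
          (pvArcs edges).countP (fun a => a.1 == (0 : Int)) := by
        rw [← List.countP_eq_length_filter]
        exact List.countP_mono_left (fun x _ hx => ((Bool.and_eq_true _ _).mp hx).1)
      have he0 : (pvArcs edges).countP
            (fun a => !(PySem.Dict.empty.insert (0 : Int) (0 : Int)).contains a.1) =
          (pvArcs edges).countP (fun a => !(a.1 == (0 : Int))) := by
        apply pvCountPCongr
        intro x _
        cases h4 : (x.1 == (0 : Int)) <;>
          simp [PySem.Dict.contains_insert, PySem.Dict.contains_empty, h4]
      have hsplit := pvCountPSplit (fun _ : Int × Int × Int => true)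
        (fun a => a.1 == (0 : Int)) (pvArcs edges)
      simp only [List.countP_true, Bool.true_and] at hsplit
      have hlen := pvArcsLen edges
      omega
    · -- initial fuel bound for B
      have := List.countP_le_length
        (p := fun e : Int × Int × Int =>
          !(PySem.Dict.empty.insert (0 : Int) (0 : Int)).contains e.1 ||
            !(PySem.Dict.empty.insert (0 : Int) (0 : Int)).contains e.2.1) (l := edges)
      omega

-- ===== VERDICT (by name: the statement is the Claim_ definition above) =====
theorem calculateMinimumSpanningTreeWeightWithFreeEdge_spec : Claim_equal_calculateMinimumSpanningTreeWeightWithFreeEdge := by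
  unfold Claim_equal_calculateMinimumSpanningTreeWeightWithFreeEdge
  intro n m edges _
  unfold Spec_calculateMinimumSpanningTreeWeightWithFreeEdge
  unfold calculateMinimumSpanningTreeWeightWithFreeEdge calculateMinimumSpanningTreeWeightWithFreeEdge_alt
  dsimp only
  rw [pvMain n edges]
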